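-- pv_equiv track=rewrite | github.com/rrojashub-source/agente-musica-mp3 | scripts/debug_duplicates.py | find_exact_title_matches
-- ===== SOURCE A (Python) =====
-- from collections import defaultdict
--
-- def find_exact_title_matches(songs):
--     """Find songs with exact same title (case-insensitive)"""
--     title_groups = defaultdict(list)
--
--     for song in songs:
--         title_lower = song.get('title', '').lower().strip()
--         if title_lower:
--             title_groups[title_lower].append(song)
--
--     # Filter groups with duplicates
--     duplicates = {title: songs_list for title, songs_list in title_groups.items() if len(songs_list) > 1}
--
--     return duplicates
-- ===== SOURCE B (Python) =====
-- def find_exact_title_matches(songs):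
--     """Find songs with exact same title (case-insensitive)"""
--     keys = [s.get('title', '').lower().strip() for s in songs]
--     dup_keys = [k for k in dict.fromkeys(keys) if k and keys.count(k) > 1]
--     return {k: [s for s, kk in zip(songs, keys) if kk == k] for k in dup_keys}
-- ===== Notes on version B (the rewrite author's own statement) =====
-- stated objective: alternative
-- what changed: B replaces A's single-pass defaultdict bucketing with a key-list pipeline: it precomputes the lowered/stripped title of every song, ordered-dedups that key list, keeps the nonempty keys occurring more than once, and builds each group by filtering the song list per key.
import Mathlib
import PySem

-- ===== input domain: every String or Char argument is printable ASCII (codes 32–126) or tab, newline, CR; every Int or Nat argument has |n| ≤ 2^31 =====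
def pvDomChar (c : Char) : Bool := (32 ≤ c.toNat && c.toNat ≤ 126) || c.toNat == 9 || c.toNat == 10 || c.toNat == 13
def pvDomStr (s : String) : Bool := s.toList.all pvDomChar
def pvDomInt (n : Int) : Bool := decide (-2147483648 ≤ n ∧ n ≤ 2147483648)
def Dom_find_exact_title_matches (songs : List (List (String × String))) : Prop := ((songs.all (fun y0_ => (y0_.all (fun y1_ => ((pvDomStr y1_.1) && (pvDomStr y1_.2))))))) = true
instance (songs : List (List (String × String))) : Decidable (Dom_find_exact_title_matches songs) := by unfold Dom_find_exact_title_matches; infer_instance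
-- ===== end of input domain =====

-- B groups by scanning the precomputed key list (ordered dedup + per-key filter) instead of
-- folding songs into hash buckets; objective: alternative (not faster).

-- shared helper: song.get('title', '').lower().strip()  (both Pythons compute this expression)
def pvKey (song : List (String × String)) : String :=
  PySem.Str.strip (PySem.Str.lower ((PySem.Dict.mk song).getD "title" ""))

-- ===== PORT A =====
def find_exact_title_matches (songs : List (List (String × String))) : List (String × List (List (String × String))) :=
  let title_groups : PySem.Dict String (List (List (String × String))) :=
    songs.foldl (fun d song =>
      let title_lower := pvKey song
      if title_lower ≠ "" then d.modify title_lower [] (fun l => l ++ [song]) else d)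
      PySem.Dict.empty
  title_groups.items.filter (fun p => decide (1 < p.2.length))

-- ===== PORT B =====
def find_exact_title_matches_alt (songs : List (List (String × String))) : List (String × List (List (String × String))) :=
  let keys := songs.map pvKey
  let dupKeys := (PySem.List.dedup keys).filter
    (fun k => !(k == "") && decide (1 < PySem.List.count keys k))
  dupKeys.map (fun k => (k, ((songs.zip keys).filter (fun p => p.2 == k)).map (·.1)))

-- ===== PRECONDITION & SPEC =====
def Spec_find_exact_title_matches (songs : List (List (String × String))) (out : List (String × List (List (String × String)))) : Prop := out = find_exact_title_matches_alt songs
instance (songs : List (List (String × String))) (out : List (String × List (List (String × String)))) : Decidable (Spec_find_exact_title_matches songs out) := by unfold Spec_find_exact_title_matches; infer_instance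

-- ===== CLAIM (what is proved, stated in full; the proofs are below) =====
def Claim_equal_find_exact_title_matches : Prop := ∀ (songs : List (List (String × String))), Dom_find_exact_title_matches songs → Spec_find_exact_title_matches songs (find_exact_title_matches songs)

-- ===== LEMMAS AND PROOFS =====

-- ordered dedup commutes with filter
theorem pv_dedup_filter (p : String → Bool) (l : List String) :
    PySem.List.dedup (l.filter p) = (PySem.List.dedup l).filter p := by
  simp only [PySem.List.dedup_eq_ofList]
  induction l with
  | nil => rfl
  | cons x xs ih =>
    by_cases hx : p x
    · simp only [List.filter_cons, hx, if_true, PySem.Set.ofList_cons, ih, PySem.Set.discard]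
      rw [List.filter_filter, List.filter_filter]
      simp [Bool.and_comm]
    · simp only [List.filter_cons, hx]
      simp only [Bool.false_eq_true, if_false, PySem.Set.ofList_cons, ih, List.filter_cons, hx,
        PySem.Set.discard]
      rw [List.filter_filter]
      apply List.filter_congr
      intro a _
      by_cases h2 : a == x
      · have : a = x := by simpa using h2
        subst this; simp [hx]
      · simp [h2]

-- B's zip-based group extraction, reduced to a plain filter
theorem pv_zip_group (l : List (List (String × String))) (k : String) :
    ((l.zip (l.map pvKey)).filter (fun p => p.2 == k)).map (·.1)
      = l.filter (fun s => pvKey s == k) := by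
  induction l with
  | nil => rfl
  | cons x xs ih =>
    by_cases h : pvKey x == k <;> simp [h, ih]

-- A's side group extraction from the (key, song) pair list
theorem pv_fst_filter_snd (l : List (List (String × String))) (k : String) :
    ((l.map (fun s => (pvKey s, s))).filter (fun p => p.1 == k)).map (·.2)
      = l.filter (fun s => pvKey s == k) := by
  induction l with
  | nil => rfl
  | cons x xs ih =>
    by_cases h : pvKey x == k <;> simp [h, ih]

-- the nonempty keys, as a filter of the full key list
theorem pv_keys_comm (l : List (List (String × String))) :
    (l.filter (fun s => !(pvKey s == ""))).map pvKey
      = (l.map pvKey).filter (fun k => !(k == "")) := by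
  induction l with
  | nil => rfl
  | cons x xs ih =>
    by_cases h : pvKey x == "" <;> simp [h, ih]

-- group size = key multiplicity
theorem pv_len_count (l : List (List (String × String))) (k : String) :
    (l.filter (fun s => pvKey s == k)).length = PySem.List.count (l.map pvKey) k := by
  induction l with
  | nil => rfl
  | cons x xs ih =>
    by_cases h : pvKey x == k <;>
      simp [h, ih, PySem.List.count_eq, List.count_cons]

-- dropping the inner nonempty filter when the key is nonempty
theorem pv_drop_nonempty (l : List (List (String × String))) (k : String) (hk : ¬(k = "")) :
    (l.filter (fun s => !(pvKey s == ""))).filter (fun s => pvKey s == k)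
      = l.filter (fun s => pvKey s == k) := by
  induction l with
  | nil => rfl
  | cons x xs ih =>
    by_cases h : pvKey x == k
    · have hx : pvKey x = k := by simpa using h
      have : ¬(pvKey x == "") = true := by simp [hx, hk]
      simp [h, this, ih]
    · by_cases h0 : pvKey x == "" <;> simp [h, h0, ih]

-- A's grouping dict, characterised
theorem pv_groups_items (songs : List (List (String × String))) :
    (songs.foldl (fun d song =>
        if pvKey song ≠ "" then d.modify (pvKey song) [] (fun l => l ++ [song]) else d)
        (PySem.Dict.empty : PySem.Dict String (List (List (String × String))))).items
    = (PySem.List.dedup ((songs.filter (fun s => !(pvKey s == ""))).map pvKey)).map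
        (fun k => (k, (songs.filter (fun s => !(pvKey s == ""))).filter (fun s => pvKey s == k))) := by
  set qs := (songs.filter (fun s => !(pvKey s == ""))).map (fun s => (pvKey s, s)) with hqs
  have hfold : (songs.foldl (fun d song =>
        if pvKey song ≠ "" then d.modify (pvKey song) [] (fun l => l ++ [song]) else d)
        (PySem.Dict.empty : PySem.Dict String (List (List (String × String)))))
      = qs.foldl (fun d p => d.modify p.1 [] (fun l => l ++ [p.2])) PySem.Dict.empty := by
    rw [hqs, List.foldl_map, List.foldl_filter]
    have : (fun (d : PySem.Dict String (List (List (String × String)))) song =>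
        if pvKey song ≠ "" then d.modify (pvKey song) [] (fun l => l ++ [song]) else d)
        = (fun d song => if (!(pvKey song == "")) = true
            then d.modify (pvKey song) [] (fun l => l ++ [song]) else d) := by
      funext d s
      by_cases h : pvKey s = "" <;> simp [h]
    rw [this]
  rw [hfold]
  have hnodup : (qs.foldl (fun d p => d.modify p.1 [] (fun l => l ++ [p.2]))
      (PySem.Dict.empty : PySem.Dict String (List (List (String × String))))).keys.Nodup := by
    exact PySem.Dict.nodup_keys_foldl_modify_key qs Prod.fst [] (fun _ p => (fun l => l ++ [p.2])) _
      (by simp [PySem.Dict.keys_empty])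
  rw [PySem.Dict.items_eq_map_keys _ hnodup []]
  have hkeys : (qs.foldl (fun d p => d.modify p.1 [] (fun l => l ++ [p.2]))
      (PySem.Dict.empty : PySem.Dict String (List (List (String × String))))).keys
      = PySem.List.dedup ((songs.filter (fun s => !(pvKey s == ""))).map pvKey) := by
    rw [PySem.Dict.keys_foldl_modify_key qs Prod.fst [] (fun _ p => (fun l => l ++ [p.2]))]
    simp [PySem.Dict.keys_empty, PySem.Set.update_nil_left, hqs, List.map_map,
      PySem.List.dedup_eq_ofList, Function.comp_def]
  rw [hkeys]
  apply List.map_congr_left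
  intro k _
  have hget : (qs.foldl (fun d p => d.modify p.1 [] (fun l => l ++ [p.2]))
      (PySem.Dict.empty : PySem.Dict String (List (List (String × String))))).getD k []
      = (qs.filter (fun p => p.1 == k)).map (·.2) := by
    rw [PySem.Dict.getD_foldl_modify_append]
    simp [PySem.Dict.getD_empty]
  rw [hget, hqs]
  rw [pv_fst_filter_snd (songs.filter (fun s => !(pvKey s == ""))) k]

-- ===== VERDICT (by name: the statement is the Claim_ definition above) =====
theorem find_exact_title_matches_spec : Claim_equal_find_exact_title_matches := by
  intro songs _
  unfold Spec_find_exact_title_matches find_exact_title_matches find_exact_title_matches_alt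
  dsimp only
  rw [pv_groups_items, List.filter_map]
  simp only [pv_zip_group, Function.comp_def]
  rw [pv_keys_comm, pv_dedup_filter, List.filter_filter]
  have hpred : ∀ k ∈ PySem.List.dedup (songs.map pvKey),
      (decide (1 < ((songs.filter (fun s => !(pvKey s == ""))).filter
          (fun s => pvKey s == k)).length) && (!(k == "")))
      = ((!(k == "")) && decide (1 < PySem.List.count (songs.map pvKey) k)) := by
    intro k _
    by_cases hk : k = ""
    · simp [hk]
    · rw [pv_drop_nonempty songs k hk, pv_len_count]
      exact Bool.and_comm _ _
  rw [List.filter_congr hpred]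
  apply List.map_congr_left
  intro k hk
  have hk' : ¬(k = "") := by
    have hmem := List.of_mem_filter hk
    have h1 : (!(k == "")) = true := Bool.and_elim_left hmem
    simpa using h1
  rw [pv_drop_nonempty songs k hk']
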